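-- pv_equiv track=rewrite | github.com/forthcoming/algorithm | leet_code.py | leet_code_7
-- ===== SOURCE A (Python) =====
-- def leet_code_7(matrix, threshold, width):  # 探索地块建立|荒地建设电站|区域发电量统计
--     x, y = len(matrix), len(matrix[0])
--     p = [[0] * (y + 1) for _ in range(x + 1)]  # p[i][j]代表matrix[0][0]与matrix[i-1][j-1]区域的元素和,二维前缀和
--     for i in range(x):
--         for j in range(y):
--             p[i + 1][j + 1] = p[i][j + 1] + p[i + 1][j] - p[i][j] + matrix[i][j]  # 容斥原理
--
--     count = 0
--     for i in range(width, x + 1):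
--         for j in range(width, y + 1):
--             if p[i][j] - p[i - width][j] - p[i][j - width] + p[i - width][j - width] >= threshold:
--                 count += 1
--     return count
-- ===== SOURCE B (Python) =====
-- def leet_code_7(matrix, threshold, width):
--     x, y = len(matrix), len(matrix[0])
--     nr, nc = x - width + 1, y - width + 1
--     if nr <= 0 or nc <= 0:
--         return 0
--     # Stage 1: horizontal sliding windows -> H[i][j] = sum(matrix[i][j:j+width])
--     H = []
--     for row in matrix:
--         s = sum(row[:width])
--         hr = [s]
--         for j in range(width, y):
--             s += row[j] - row[j - width]
--             hr.append(s)
--         H.append(hr)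
--     # Stage 2: per column of H, vertical sliding window of height `width`
--     count = 0
--     for j in range(nc):
--         s = sum(H[i][j] for i in range(width))
--         if s >= threshold:
--             count += 1
--         for i in range(width, x):
--             s += H[i][j] - H[i - width][j]
--             if s >= threshold:
--                 count += 1
--     return count
-- ===== Notes on version B (the rewrite author's own statement) =====
-- stated objective: faster
-- what changed: Replaces the 2D prefix-sum table + inclusion-exclusion with a two-stage sliding-window reduction: horizontal running windows build H[i][j]=sum(row[j:j+width]) per row, then a vertical running window of height width per column counts squares with sum >= threshold; no (x+1)x(y+1) table of per-cell list assignments is built.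
import Mathlib
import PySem

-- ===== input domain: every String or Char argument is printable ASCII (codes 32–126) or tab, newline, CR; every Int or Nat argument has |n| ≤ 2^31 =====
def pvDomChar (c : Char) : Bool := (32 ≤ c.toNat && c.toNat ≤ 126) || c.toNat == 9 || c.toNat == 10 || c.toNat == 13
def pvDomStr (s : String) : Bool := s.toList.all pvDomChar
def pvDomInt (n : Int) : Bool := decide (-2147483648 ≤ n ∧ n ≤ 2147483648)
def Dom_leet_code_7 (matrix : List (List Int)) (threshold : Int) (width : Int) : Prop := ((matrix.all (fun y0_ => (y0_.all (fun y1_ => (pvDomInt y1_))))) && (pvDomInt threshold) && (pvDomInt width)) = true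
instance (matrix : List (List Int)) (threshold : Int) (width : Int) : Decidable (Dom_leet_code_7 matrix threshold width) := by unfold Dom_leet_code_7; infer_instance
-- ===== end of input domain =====

-- B replaces A's 2D prefix-sum table + inclusion-exclusion by a two-stage sliding-window
-- reduction (horizontal row windows, then a vertical running window per column); same
-- asymptotic cost, measurably faster by a constant factor (no per-cell table assignments).

-- ===== PORT A =====
-- Literal transliteration of A. All pyGetD defaults are only reached outside Pre_.
def leet_code_7 (matrix : List (List Int)) (threshold : Int) (width : Int) : Int :=
  let x : Int := (matrix.length : Int)
  let y : Int := ((PySem.List.pyGetD matrix 0 []).length : Int)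
  let p : List (List Int) :=
    (PySem.List.pyRange 0 (x + 1) 1).map (fun _ => List.replicate (y + 1).toNat 0)
  let p : List (List Int) :=
    (PySem.List.pyRange 0 x 1).foldl (fun p i =>
      (PySem.List.pyRange 0 y 1).foldl (fun p j =>
        let v : Int :=
          PySem.List.pyGetD (PySem.List.pyGetD p i []) (j + 1) 0
          + PySem.List.pyGetD (PySem.List.pyGetD p (i + 1) []) j 0
          - PySem.List.pyGetD (PySem.List.pyGetD p i []) j 0
          + PySem.List.pyGetD (PySem.List.pyGetD matrix i []) j 0
        PySem.List.pySetD p (i + 1)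
          (PySem.List.pySetD (PySem.List.pyGetD p (i + 1) []) (j + 1) v)) p) p
  (PySem.List.pyRange width (x + 1) 1).foldl (fun count i =>
    (PySem.List.pyRange width (y + 1) 1).foldl (fun count j =>
      if PySem.List.pyGetD (PySem.List.pyGetD p i []) j 0
         - PySem.List.pyGetD (PySem.List.pyGetD p (i - width) []) j 0
         - PySem.List.pyGetD (PySem.List.pyGetD p i []) (j - width) 0
         + PySem.List.pyGetD (PySem.List.pyGetD p (i - width) []) (j - width) 0 ≥ threshold
      then count + 1 else count) count) 0

-- ===== PORT B =====
-- Literal transliteration of Source B (two-stage sliding windows).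
def leet_code_7_alt (matrix : List (List Int)) (threshold : Int) (width : Int) : Int :=
  let x : Int := (matrix.length : Int)
  let y : Int := ((PySem.List.pyGetD matrix 0 []).length : Int)
  let nr : Int := x - width + 1
  let nc : Int := y - width + 1
  if nr ≤ 0 ∨ nc ≤ 0 then 0
  else
    let H : List (List Int) :=
      matrix.foldl (fun H row =>
        let s : Int := (PySem.List.slice row none (some width)).sum
        let state : Int × List Int :=
          (PySem.List.pyRange width y 1).foldl (fun (st : Int × List Int) j =>
            let s := st.1 + PySem.List.pyGetD row j 0 - PySem.List.pyGetD row (j - width) 0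
            (s, st.2 ++ [s])) (s, [s])
        H ++ [state.2]) []
    (PySem.List.pyRange 0 nc 1).foldl (fun count j =>
      let s : Int :=
        ((PySem.List.pyRange 0 width 1).map (fun i =>
          PySem.List.pyGetD (PySem.List.pyGetD H i []) j 0)).sum
      let count := if s ≥ threshold then count + 1 else count
      let state : Int × Int :=
        (PySem.List.pyRange width x 1).foldl (fun (cs : Int × Int) i =>
          let s := cs.2 + PySem.List.pyGetD (PySem.List.pyGetD H i []) j 0
                        - PySem.List.pyGetD (PySem.List.pyGetD H (i - width) []) j 0
          (if s ≥ threshold then cs.1 + 1 else cs.1, s)) (count, s)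
      state.1) 0

-- ===== PRECONDITION & SPEC =====
-- Pre_ excludes exactly the inputs on which A raises: the empty matrix (len(matrix[0]) is an
-- IndexError), a negative width (the counting loop then hits an out-of-range index of p), and
-- matrices with a row shorter than the first row (matrix[i][j] raises while building p).
def Pre_leet_code_7 (matrix : List (List Int)) (threshold : Int) (width : Int) : Prop :=
  matrix ≠ [] ∧ 0 ≤ width ∧ ∀ r ∈ matrix, matrix.headI.length ≤ r.length

instance (matrix : List (List Int)) (threshold : Int) (width : Int) : Decidable (Pre_leet_code_7 matrix threshold width) := by unfold Pre_leet_code_7; infer_instance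

def pvWitness_leet_code_7 : List (List Int) × Int × Int := ([[1, 2], [3, 4]], 3, 1)

def Spec_leet_code_7 (matrix : List (List Int)) (threshold : Int) (width : Int) (out : Int) : Prop := out = leet_code_7_alt matrix threshold width
instance (matrix : List (List Int)) (threshold : Int) (width : Int) (out : Int) : Decidable (Spec_leet_code_7 matrix threshold width out) := by unfold Spec_leet_code_7; infer_instance

-- ===== CLAIM (what is proved, stated in full; the proofs are below) =====
def Claim_equal_leet_code_7 : Prop := ∀ (matrix : List (List Int)) (threshold : Int) (width : Int), Dom_leet_code_7 matrix threshold width → Pre_leet_code_7 matrix threshold width → Spec_leet_code_7 matrix threshold width (leet_code_7 matrix threshold width)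

-- ===== LEMMAS AND PROOFS =====
-- spec-level functions
def pvEl (m : List (List Int)) (r c : Nat) : Int := (m.getD r []).getD c 0
def pvRowPre (m : List (List Int)) (r c : Nat) : Int := ∑ b ∈ Finset.range c, pvEl m r b
def pvPre (m : List (List Int)) (i j : Nat) : Int := ∑ a ∈ Finset.range i, pvRowPre m a j
def pvSeg (m : List (List Int)) (w r j : Nat) : Int := ∑ b ∈ Finset.range w, pvEl m r (j+b)
def pvVert (m : List (List Int)) (w k j : Nat) : Int := ∑ a ∈ Finset.range w, pvSeg m w (k+a) j
def pvRect (m : List (List Int)) (w k l : Nat) : Int :=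
  pvPre m (k+w) (l+w) - pvPre m k (l+w) - pvPre m (k+w) l + pvPre m k l

theorem pv_sum_shift (f : Nat → Int) (k w : Nat) :
    ∑ i ∈ Finset.range (k+w), f i = (∑ i ∈ Finset.range k, f i) + ∑ a ∈ Finset.range w, f (k+a) := by
  induction w with
  | zero => simp
  | succ w ih => rw [← Nat.add_assoc, Finset.sum_range_succ, ih, Finset.sum_range_succ]; ring

theorem pv_slide (f : Nat → Int) (n w : Nat) :
    ∑ a ∈ Finset.range w, f (n+1+a) = (∑ a ∈ Finset.range w, f (n+a)) + f (n+w) - f n := by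
  have h1 : ∑ a ∈ Finset.range (w+1), f (n+a) = (∑ a ∈ Finset.range w, f (n+a)) + f (n+w) :=
    Finset.sum_range_succ _ _
  have h2 : ∑ a ∈ Finset.range (w+1), f (n+a) = (∑ a ∈ Finset.range w, f (n+(a+1))) + f (n+0) :=
    Finset.sum_range_succ' _ _
  have h3 : ∑ a ∈ Finset.range w, f (n+(a+1)) = ∑ a ∈ Finset.range w, f (n+1+a) :=
    Finset.sum_congr rfl (fun a _ => by rw [show n+(a+1) = n+1+a by omega])
  rw [h3] at h2
  simp only [Nat.add_zero] at h2
  omega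

theorem pv_take_sum (xs : List Int) (w : Nat) :
    (xs.take w).sum = ∑ b ∈ Finset.range w, xs.getD b 0 := by
  induction xs generalizing w with
  | nil => simp
  | cons a xs ih =>
      cases w with
      | zero => simp
      | succ w =>
          rw [List.take_succ_cons, List.sum_cons, ih, Finset.sum_range_succ']
          simp [List.getD]
          ring

theorem pv_foldl_range_inv {σ : Type} (g : σ → Nat → σ) (I : Nat → σ → Prop) (n : Nat) (s0 : σ)
    (h0 : I 0 s0) (hstep : ∀ k s, k < n → I k s → I (k+1) (g s k)) :
    I n ((List.range n).foldl g s0) := by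
  induction n with
  | zero => simpa using h0
  | succ n ih =>
      rw [List.range_succ, List.foldl_append, List.foldl_cons, List.foldl_nil]
      exact hstep n _ (Nat.lt_succ_self n) (ih (fun k s hk => hstep k s (Nat.lt_succ_of_lt hk)))

theorem pv_getD_set (xs : List Int) (n m : Nat) (v d : Int) (hn : n < xs.length) :
    (xs.set n v).getD m d = if m = n then v else xs.getD m d := by
  by_cases h : m = n
  · subst h; simp [List.getD, List.getElem?_set_self (by omega)]
  · simp [List.getD, List.getElem?_set_ne (by omega : n ≠ m), h]

theorem pv_getD_set' (xs : List (List Int)) (n m : Nat) (v : List Int) (hn : n < xs.length) :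
    (xs.set n v).getD m [] = if m = n then v else xs.getD m [] := by
  by_cases h : m = n
  · subst h; simp [List.getD, List.getElem?_set_self (by omega)]
  · simp [List.getD, List.getElem?_set_ne (by omega : n ≠ m), h]

theorem pvPre_rec (m : List (List Int)) (k j : Nat) :
    pvPre m (k+1) (j+1) = pvPre m k (j+1) + pvPre m (k+1) j - pvPre m k j + pvEl m k j := by
  simp only [pvPre, Finset.sum_range_succ, pvRowPre, Finset.sum_range_succ]
  ring

theorem pvPre_zero_right (m : List (List Int)) (i : Nat) : pvPre m i 0 = 0 := by
  simp [pvPre, pvRowPre]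

def pvInvA (m : List (List Int)) (g : Nat → Nat → Int) (p : List (List Int)) : Prop :=
  p.length = m.length + 1 ∧
  (∀ r, r < m.length + 1 → (p.getD r []).length = (m.getD 0 []).length + 1) ∧
  (∀ r c, r < m.length + 1 → c < (m.getD 0 []).length + 1 → (p.getD r []).getD c 0 = g r c)

theorem pvInvA_congr (m : List (List Int)) (g1 g2 : Nat → Nat → Int) (p : List (List Int))
    (h : ∀ r c, r < m.length + 1 → c < (m.getD 0 []).length + 1 → g1 r c = g2 r c)
    (hp : pvInvA m g1 p) : pvInvA m g2 p :=
  ⟨hp.1, hp.2.1, fun r c hr hc => (hp.2.2 r c hr hc).trans (h r c hr hc)⟩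

theorem pv_foldl_pyRange_zero {σ : Type} (g : σ → Int → σ) (n : Nat) (s : σ) :
    (PySem.List.pyRange 0 (n : Int) 1).foldl g s = (List.range n).foldl (fun (s : σ) (k : Nat) => g s (k : Int)) s := by
  rw [PySem.List.pyRange_zero_natCast, List.foldl_map]

theorem pv_foldl_pyRange_from {σ : Type} (g : σ → Int → σ) (a : Int) (b : Int) (s : σ) :
    (PySem.List.pyRange a b 1).foldl g s = (List.range (b - a).toNat).foldl (fun (s : σ) (k : Nat) => g s (a + (k : Int))) s := by
  rw [PySem.List.pyRange_one, List.foldl_map]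

theorem pv_foldl_sum (n : Nat) (g : Int → Nat → Int) (S : Nat → Int) (c0 : Int)
    (h : ∀ c k, k < n → g c k = c + S k) :
    (List.range n).foldl g c0 = c0 + ∑ k ∈ Finset.range n, S k := by
  induction n generalizing c0 with
  | zero => simp
  | succ n ih =>
      rw [List.range_succ, List.foldl_append, List.foldl_cons, List.foldl_nil,
        ih _ (fun c k hk => h c k (Nat.lt_succ_of_lt hk)),
        h _ n (Nat.lt_succ_self n), Finset.sum_range_succ]
      ring

theorem pvA_table (m : List (List Int)) :
    pvInvA m (fun r c => if r ≤ m.length then pvPre m r c else 0)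
      ((PySem.List.pyRange 0 ((m.length : Nat) : Int) 1).foldl (fun p i =>
        (PySem.List.pyRange 0 (((m.getD 0 []).length : Nat) : Int) 1).foldl (fun p j =>
          PySem.List.pySetD p (i + 1)
            (PySem.List.pySetD (PySem.List.pyGetD p (i + 1) []) (j + 1)
              (PySem.List.pyGetD (PySem.List.pyGetD p i []) (j + 1) 0
               + PySem.List.pyGetD (PySem.List.pyGetD p (i + 1) []) j 0
               - PySem.List.pyGetD (PySem.List.pyGetD p i []) j 0
               + PySem.List.pyGetD (PySem.List.pyGetD m i []) j 0))) p)
        (List.replicate (m.length + 1) (List.replicate ((m.getD 0 []).length + 1) 0))) := by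
  rw [pv_foldl_pyRange_zero]
  refine pv_foldl_range_inv _
    (fun k p => pvInvA m (fun r c => if r ≤ k then pvPre m r c else 0) p)
    m.length (List.replicate (m.length + 1) (List.replicate ((m.getD 0 []).length + 1) 0)) ?_ ?_
  · refine ⟨by simp, fun r hr => ?_, fun r c hr hc => ?_⟩
    · have e1 : (List.replicate (m.length + 1) (List.replicate ((m.getD 0 []).length + 1) (0 : Int))).getD r []
          = List.replicate ((m.getD 0 []).length + 1) 0 := by
        simp [List.getD, hr]
      rw [e1, List.length_replicate]
    · have e1 : (List.replicate (m.length + 1) (List.replicate ((m.getD 0 []).length + 1) (0 : Int))).getD r []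
          = List.replicate ((m.getD 0 []).length + 1) 0 := by
        simp [List.getD, hr]
      have e2 : (List.replicate ((m.getD 0 []).length + 1) (0 : Int)).getD c 0 = 0 := by
        simp [List.getD]
      rw [e1, e2]
      beta_reduce
      rcases Nat.eq_zero_or_pos r with h | h
      · subst h
        rw [if_pos (by omega), pvPre]
        simp
      · rw [if_neg (by omega)]
  · intro k p hk hInv
    rw [pv_foldl_pyRange_zero]
    refine pvInvA_congr m _ _ _ (fun r c hr hc => ?_)
      (pv_foldl_range_inv _
        (fun j p => pvInvA m (fun r c => if r ≤ k ∨ (r = k + 1 ∧ c ≤ j) then pvPre m r c else 0) p)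
        ((m.getD 0 []).length) p ?_ ?_)
    · by_cases h1 : r ≤ k + 1
      · rw [if_pos (by omega : r ≤ k ∨ (r = k + 1 ∧ c ≤ (m.getD 0 []).length)), if_pos h1]
      · rw [if_neg (by omega : ¬ (r ≤ k ∨ (r = k + 1 ∧ c ≤ (m.getD 0 []).length))), if_neg h1]
    · refine pvInvA_congr m _ _ p (fun r c hr hc => ?_) hInv
      by_cases h1 : r ≤ k
      · rw [if_pos h1, if_pos (by omega : r ≤ k ∨ (r = k + 1 ∧ c ≤ 0))]
      · by_cases h2 : r = k + 1 ∧ c ≤ 0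
        · have hc0 : c = 0 := by omega
          rw [if_neg h1, if_pos (Or.inr h2), hc0, pvPre_zero_right]
        · rw [if_neg h1, if_neg (by omega : ¬ (r ≤ k ∨ (r = k + 1 ∧ c ≤ 0)))]
    · intro j p hj hJ
      obtain ⟨hlen, hrow, hent⟩ := hJ
      have ck : ((k : Int) + 1) = (((k + 1 : Nat) : Nat) : Int) := by push_cast; ring
      have cj : ((j : Int) + 1) = (((j + 1 : Nat) : Nat) : Int) := by push_cast; ring
      rw [ck, cj]
      simp only [PySem.List.pySetD_natCast, PySem.List.pyGetD_natCast]
      have hk1 : k + 1 < p.length := by omega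
      have hv : (p.getD k []).getD (j + 1) 0 + (p.getD (k + 1) []).getD j 0
          - (p.getD k []).getD j 0 + (m.getD k []).getD j 0 = pvPre m (k + 1) (j + 1) := by
        rw [hent k (j + 1) (by omega) (by omega), hent (k + 1) j (by omega) (by omega),
          hent k j (by omega) (by omega)]
        beta_reduce
        rw [if_pos (by omega : k ≤ k ∨ (k = k + 1 ∧ j + 1 ≤ j)),
            if_pos (by omega : k + 1 ≤ k ∨ (k + 1 = k + 1 ∧ j ≤ j)),
            if_pos (by omega : k ≤ k ∨ (k = k + 1 ∧ j ≤ j)),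
            pvPre_rec m k j]
        rfl
      rw [hv]
      refine ⟨by rw [List.length_set]; exact hlen, fun r hr => ?_, fun r c hr hc => ?_⟩
      · rw [pv_getD_set' p (k + 1) r _ hk1]
        by_cases h1 : r = k + 1
        · rw [if_pos h1, List.length_set]
          exact hrow (k + 1) (by omega)
        · rw [if_neg h1]
          exact hrow r hr
      · beta_reduce
        rw [pv_getD_set' p (k + 1) r _ hk1]
        by_cases h1 : r = k + 1
        · subst h1
          rw [if_pos rfl, pv_getD_set _ (j + 1) c _ 0 (by rw [hrow (k + 1) (by omega)]; omega)]
          by_cases h2 : c = j + 1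
          · subst h2
            rw [if_pos rfl, if_pos (by omega : k + 1 ≤ k ∨ (k + 1 = k + 1 ∧ j + 1 ≤ j + 1))]
          · rw [if_neg h2, hent (k + 1) c (by omega) hc]
            beta_reduce
            by_cases h3 : c ≤ j
            · rw [if_pos (by omega : k + 1 ≤ k ∨ (k + 1 = k + 1 ∧ c ≤ j)),
                  if_pos (by omega : k + 1 ≤ k ∨ (k + 1 = k + 1 ∧ c ≤ j + 1))]
            · rw [if_neg (by omega : ¬ (k + 1 ≤ k ∨ (k + 1 = k + 1 ∧ c ≤ j))),
                  if_neg (by omega : ¬ (k + 1 ≤ k ∨ (k + 1 = k + 1 ∧ c ≤ j + 1)))]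
        · rw [if_neg h1, hent r c hr hc]
          beta_reduce
          by_cases h2 : r ≤ k
          · rw [if_pos (by omega : r ≤ k ∨ (r = k + 1 ∧ c ≤ j)),
                if_pos (by omega : r ≤ k ∨ (r = k + 1 ∧ c ≤ j + 1))]
          · rw [if_neg (by omega : ¬ (r ≤ k ∨ (r = k + 1 ∧ c ≤ j))),
                if_neg (by omega : ¬ (r ≤ k ∨ (r = k + 1 ∧ c ≤ j + 1)))]

theorem pvA_eq (m : List (List Int)) (t : Int) (w : Nat) :
    leet_code_7 m t (w : Int) =
      ∑ k ∈ Finset.range (m.length + 1 - w), ∑ l ∈ Finset.range ((m.getD 0 []).length + 1 - w),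
        (if t ≤ pvRect m w k l then (1 : Int) else 0) := by
  simp only [leet_code_7, PySem.List.pyGetD_ofNat']
  have cx : ((m.length : Int) + 1) = (((m.length + 1 : Nat) : Nat) : Int) := by push_cast; ring
  have cy : (((m.getD 0 []).length : Int) + 1) = ((((m.getD 0 []).length + 1 : Nat) : Nat) : Int) := by
    push_cast; ring
  rw [cx, cy]
  have einit : (PySem.List.pyRange 0 (((m.length + 1 : Nat) : Nat) : Int) 1).map
      (fun _ => List.replicate (((((m.getD 0 []).length + 1 : Nat) : Nat) : Int)).toNat (0 : Int))
      = List.replicate (m.length + 1) (List.replicate ((m.getD 0 []).length + 1) 0) := by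
    rw [PySem.List.pyRange_zero_natCast, List.map_map]
    simp [Function.comp_def, List.map_const']
  rw [einit]
  set P := (PySem.List.pyRange 0 ((m.length : Nat) : Int) 1).foldl (fun p i =>
      (PySem.List.pyRange 0 (((m.getD 0 []).length : Nat) : Int) 1).foldl (fun p j =>
        PySem.List.pySetD p (i + 1)
          (PySem.List.pySetD (PySem.List.pyGetD p (i + 1) []) (j + 1)
            (PySem.List.pyGetD (PySem.List.pyGetD p i []) (j + 1) 0
             + PySem.List.pyGetD (PySem.List.pyGetD p (i + 1) []) j 0
             - PySem.List.pyGetD (PySem.List.pyGetD p i []) j 0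
             + PySem.List.pyGetD (PySem.List.pyGetD m i []) j 0))) p)
      (List.replicate (m.length + 1) (List.replicate ((m.getD 0 []).length + 1) 0)) with hP
  have htab := pvA_table m
  rw [← hP] at htab
  obtain ⟨hlen, hrow, hent⟩ := htab
  rw [pv_foldl_pyRange_from, Int.toNat_sub]
  refine (pv_foldl_sum _ _ (fun k => ∑ l ∈ Finset.range ((m.getD 0 []).length + 1 - w),
      (if t ≤ pvRect m w k l then (1 : Int) else 0)) 0 ?_).trans (zero_add _)
  intro c k hk
  rw [pv_foldl_pyRange_from, Int.toNat_sub]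
  refine pv_foldl_sum _ _ _ c ?_
  intro c' l hl
  have ek : ((w : Int) + (k : Int)) = (((w + k : Nat) : Nat) : Int) := by push_cast; ring
  have el : ((w : Int) + (l : Int)) = (((w + l : Nat) : Nat) : Int) := by push_cast; ring
  have ek' : ((((w + k : Nat) : Nat) : Int) - (w : Int)) = ((k : Nat) : Int) := by push_cast; ring
  have el' : ((((w + l : Nat) : Nat) : Int) - (w : Int)) = ((l : Nat) : Int) := by push_cast; ring
  rw [ek, el, ek', el']
  simp only [PySem.List.pyGetD_natCast]
  rw [hent (w + k) (w + l) (by omega) (by omega), hent k (w + l) (by omega) (by omega),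
      hent (w + k) l (by omega) (by omega), hent k l (by omega) (by omega)]
  beta_reduce
  rw [if_pos (by omega : w + k ≤ m.length), if_pos (by omega : k ≤ m.length),
      if_pos (by omega : w + k ≤ m.length), if_pos (by omega : k ≤ m.length)]
  rw [Nat.add_comm w k, Nat.add_comm w l]
  simp only [pvRect, ge_iff_le]
  split_ifs <;> ring

theorem pv_sum_map_range (n : Nat) (f : Nat → Int) :
    ((List.range n).map f).sum = ∑ i ∈ Finset.range n, f i := by
  induction n with
  | zero => simp
  | succ n ih => rw [List.range_succ, List.map_append, List.sum_append, Finset.sum_range_succ, ih]; simp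

theorem pv_getD_map (m : List (List Int)) (f : List Int → List Int) (i : Nat) (hi : i < m.length) :
    (m.map f).getD i [] = f (m.getD i []) := by
  simp [List.getD, List.getElem?_map, List.getElem?_eq_getElem hi]

def pvSegRow (row : List Int) (w j : Nat) : Int := ∑ b ∈ Finset.range w, row.getD (j + b) 0

theorem pvSegRow_eq (m : List (List Int)) (w r j : Nat) :
    pvSegRow (m.getD r []) w j = pvSeg m w r j := rfl

theorem pvVert_eq_pvRect (m : List (List Int)) (w k l : Nat) :
    pvVert m w k l = pvRect m w k l := by
  have hseg : ∀ r, pvSeg m w r l = pvRowPre m r (l + w) - pvRowPre m r l := by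
    intro r
    have := pv_sum_shift (fun b => pvEl m r b) l w
    simp only [pvRowPre, pvSeg]
    omega
  have hcol : ∀ c, pvPre m (k + w) c = pvPre m k c + ∑ a ∈ Finset.range w, pvRowPre m (k + a) c := by
    intro c
    exact pv_sum_shift (fun a => pvRowPre m a c) k w
  simp only [pvVert, pvRect, hcol, hseg, Finset.sum_sub_distrib]
  ring

-- B's per-row horizontal sliding window builds the list of window sums
theorem pvB_hr (row : List Int) (w yN : Nat) :
    (PySem.List.pyRange (w : Int) (yN : Int) 1).foldl
      (fun (st : Int × List Int) j =>
        (st.1 + PySem.List.pyGetD row j 0 - PySem.List.pyGetD row (j - (w : Int)) 0,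
         st.2 ++ [st.1 + PySem.List.pyGetD row j 0 - PySem.List.pyGetD row (j - (w : Int)) 0]))
      (pvSegRow row w 0, [pvSegRow row w 0])
    = (pvSegRow row w (yN - w), (List.range (yN - w + 1)).map (pvSegRow row w)) := by
  rw [pv_foldl_pyRange_from, Int.toNat_sub]
  have final := pv_foldl_range_inv
    (fun (st : Int × List Int) (n : Nat) =>
      (st.1 + PySem.List.pyGetD row ((w : Int) + (n : Int)) 0
         - PySem.List.pyGetD row (((w : Int) + (n : Int)) - (w : Int)) 0,
       st.2 ++ [st.1 + PySem.List.pyGetD row ((w : Int) + (n : Int)) 0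
         - PySem.List.pyGetD row (((w : Int) + (n : Int)) - (w : Int)) 0]))
    (fun n st => st = (pvSegRow row w n, (List.range (n + 1)).map (pvSegRow row w)))
    (yN - w) (pvSegRow row w 0, [pvSegRow row w 0]) (by simp [List.range_succ]) ?_
  · exact final
  · intro n st hn hst
    subst hst
    dsimp only
    have e1 : ((w : Int) + (n : Int)) = (((w + n : Nat) : Nat) : Int) := by push_cast; ring
    have e2 : ((((w + n : Nat) : Nat) : Int) - (w : Int)) = ((n : Nat) : Int) := by push_cast; ring
    rw [e1, e2]
    simp only [PySem.List.pyGetD_natCast]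
    have hs : pvSegRow row w n + row.getD (w + n) 0 - row.getD n 0 = pvSegRow row w (n + 1) := by
      have h := pv_slide (fun i => row.getD i 0) n w
      simp only [pvSegRow]
      rw [show w + n = n + w from by omega]
      omega
    have hr : ∀ k : Nat, (List.range (k + 1)).map (pvSegRow row w)
        = (List.range k).map (pvSegRow row w) ++ [pvSegRow row w k] := by
      intro k
      rw [List.range_succ, List.map_append]
      rfl
    rw [hs, hr (n + 1)]

theorem pvB_H (m : List (List Int)) (w : Nat) :
    (m.foldl (fun H row =>
      H ++ [((PySem.List.pyRange (w : Int) (((m.getD 0 []).length : Nat) : Int) 1).foldl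
        (fun (st : Int × List Int) j =>
          (st.1 + PySem.List.pyGetD row j 0 - PySem.List.pyGetD row (j - (w : Int)) 0,
           st.2 ++ [st.1 + PySem.List.pyGetD row j 0 - PySem.List.pyGetD row (j - (w : Int)) 0]))
        ((PySem.List.slice row none (some (w : Int))).sum,
         [(PySem.List.slice row none (some (w : Int))).sum])).2]) [])
    = m.map (fun row => (List.range ((m.getD 0 []).length - w + 1)).map (pvSegRow row w)) := by
  rw [PySem.List.foldl_append_singleton_eq_map, List.nil_append]
  refine List.map_congr_left ?_
  intro row _
  have hs0 : (PySem.List.slice row none (some ((w : Nat) : Int))).sum = pvSegRow row w 0 := by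
    rw [PySem.List.slice_to_natCast, pv_take_sum]
    simp [pvSegRow]
  rw [hs0, pvB_hr row w ((m.getD 0 []).length)]

theorem pvB_eq (m : List (List Int)) (t : Int) (w : Nat) :
    leet_code_7_alt m t (w : Int) =
      ∑ l ∈ Finset.range ((m.getD 0 []).length + 1 - w), ∑ k ∈ Finset.range (m.length + 1 - w),
        (if t ≤ pvVert m w k l then (1 : Int) else 0) := by
  simp only [leet_code_7_alt, PySem.List.pyGetD_ofNat']
  by_cases hdeg : ((m.length : Int) - (w : Int) + 1 ≤ 0 ∨ ((m.getD 0 []).length : Int) - (w : Int) + 1 ≤ 0)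
  · rw [if_pos hdeg]
    rcases hdeg with h | h
    · have hx0 : m.length + 1 - w = 0 := by omega
      rw [hx0]
      simp
    · have hy0 : (m.getD 0 []).length + 1 - w = 0 := by omega
      rw [hy0]
      simp
  · rw [if_neg hdeg]
    have hw1 : w ≤ m.length := by omega
    have hw2 : w ≤ (m.getD 0 []).length := by omega
    rw [pvB_H m w]
    have hcy : (((m.getD 0 []).length : Int) - (w : Int) + 1) = ((((m.getD 0 []).length - w + 1 : Nat) : Nat) : Int) := by omega
    rw [hcy, pv_foldl_pyRange_zero]
    have hby : (m.getD 0 []).length + 1 - w = (m.getD 0 []).length - w + 1 := by omega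
    have hbx : m.length + 1 - w = m.length - w + 1 := by omega
    rw [hby, hbx]
    refine (pv_foldl_sum _ _ (fun l => ∑ k ∈ Finset.range (m.length - w + 1),
        (if t ≤ pvVert m w k l then (1 : Int) else 0)) 0 ?_).trans (zero_add _)
    intro c j hj
    dsimp only
    have hs0 : ((PySem.List.pyRange 0 ((w : Nat) : Int) 1).map (fun i =>
        PySem.List.pyGetD (PySem.List.pyGetD
          (m.map (fun row => (List.range ((m.getD 0 []).length - w + 1)).map (pvSegRow row w))) i [])
          ((j : Nat) : Int) 0)).sum = pvVert m w 0 j := by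
      rw [PySem.List.pyRange_zero_natCast, List.map_map, pv_sum_map_range, pvVert]
      refine Finset.sum_congr rfl ?_
      intro i hi
      have hiw : i < w := Finset.mem_range.mp hi
      simp only [Function.comp_def, PySem.List.pyGetD_natCast]
      rw [pv_getD_map _ _ i (by omega), PySem.List.getD_map_range _ _ j 0 (by omega), pvSegRow_eq]
      rw [Nat.zero_add]
    rw [hs0, pv_foldl_pyRange_from, Int.toNat_sub]
    have hfin := pv_foldl_range_inv
      (fun (cs : Int × Int) (n : Nat) =>
        (if cs.2 + PySem.List.pyGetD (PySem.List.pyGetD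
              (m.map (fun row => (List.range ((m.getD 0 []).length - w + 1)).map (pvSegRow row w)))
              ((w : Int) + (n : Int)) []) ((j : Nat) : Int) 0
           - PySem.List.pyGetD (PySem.List.pyGetD
              (m.map (fun row => (List.range ((m.getD 0 []).length - w + 1)).map (pvSegRow row w)))
              (((w : Int) + (n : Int)) - (w : Int)) []) ((j : Nat) : Int) 0 ≥ t
         then cs.1 + 1 else cs.1,
         cs.2 + PySem.List.pyGetD (PySem.List.pyGetD
              (m.map (fun row => (List.range ((m.getD 0 []).length - w + 1)).map (pvSegRow row w)))
              ((w : Int) + (n : Int)) []) ((j : Nat) : Int) 0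
           - PySem.List.pyGetD (PySem.List.pyGetD
              (m.map (fun row => (List.range ((m.getD 0 []).length - w + 1)).map (pvSegRow row w)))
              (((w : Int) + (n : Int)) - (w : Int)) []) ((j : Nat) : Int) 0))
      (fun n st => st = (c + ∑ k ∈ Finset.range (n + 1), (if t ≤ pvVert m w k j then (1 : Int) else 0),
        pvVert m w n j))
      (m.length - w)
      ((if pvVert m w 0 j ≥ t then c + 1 else c), pvVert m w 0 j) ?_ ?_
    · rw [hfin]
    · have hb : (if pvVert m w 0 j ≥ t then c + 1 else c)
          = c + ∑ k ∈ Finset.range (0 + 1), (if t ≤ pvVert m w k j then (1 : Int) else 0) := by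
        simp only [Finset.sum_range_one, Nat.zero_add, ge_iff_le]
        split_ifs <;> ring
      rw [hb]
    · intro n st hn hst
      subst hst
      dsimp only
      have e1 : ((w : Int) + (n : Int)) = (((w + n : Nat) : Nat) : Int) := by push_cast; ring
      have e2 : ((((w + n : Nat) : Nat) : Int) - (w : Int)) = ((n : Nat) : Int) := by push_cast; ring
      rw [e1, e2]
      simp only [PySem.List.pyGetD_natCast]
      rw [pv_getD_map _ _ (w + n) (by omega), pv_getD_map _ _ n (by omega),
        PySem.List.getD_map_range _ _ j 0 (by omega), PySem.List.getD_map_range _ _ j 0 (by omega),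
        pvSegRow_eq, pvSegRow_eq]
      have hsv : pvVert m w n j + pvSeg m w (w + n) j - pvSeg m w n j = pvVert m w (n + 1) j := by
        have h := pv_slide (fun r => pvSeg m w r j) n w
        simp only [pvVert]
        rw [show w + n = n + w from by omega]
        omega
      rw [hsv]
      have hc2 : (if pvVert m w (n + 1) j ≥ t then
            (c + ∑ k ∈ Finset.range (n + 1), (if t ≤ pvVert m w k j then (1 : Int) else 0)) + 1
          else (c + ∑ k ∈ Finset.range (n + 1), (if t ≤ pvVert m w k j then (1 : Int) else 0)))
          = c + ∑ k ∈ Finset.range (n + 1 + 1), (if t ≤ pvVert m w k j then (1 : Int) else 0) := by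
        conv_rhs => rw [Finset.sum_range_succ]
        simp only [ge_iff_le]
        split_ifs <;> ring
      rw [hc2]

theorem pv_main (m : List (List Int)) (t width : Int) (hw : 0 ≤ width) :
    leet_code_7 m t width = leet_code_7_alt m t width := by
  obtain ⟨w, rfl⟩ : ∃ w : Nat, width = (w : Int) := ⟨width.toNat, (Int.toNat_of_nonneg hw).symm⟩
  rw [pvA_eq, pvB_eq, Finset.sum_comm]
  exact Finset.sum_congr rfl (fun l _ => Finset.sum_congr rfl (fun k _ => by rw [pvVert_eq_pvRect]))

-- ===== VERDICT (by name: the statement is the Claim_ definition above) =====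
theorem leet_code_7_spec : Claim_equal_leet_code_7 := by
  intro matrix threshold width _ hpre
  unfold Spec_leet_code_7
  exact pv_main matrix threshold width hpre.2.1
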